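-- pv_equiv track=rewrite | github.com/jasonc71/something | Siamese_network.py | create_hash_for_positive
-- ===== SOURCE A (Python) =====
-- def create_hash_for_positive(class_indices):
--     d = {}
--     for i in range(len(class_indices)):
--         if i not in d:
--             d[i] = []
--
--         # search backward
--         for j in range(i):
--             if class_indices[i - j - 1] == class_indices[i]:
--                 d[i].append(i-j-1)
--             else:
--                 break
--
--         # search forward
--         for j in range(len(class_indices) - i - 1):
--             if class_indices[i + 1 + j] == class_indices[i]:
--                 d[i].append(i + 1 + j)
--             else:
--                 break
--
--     return d
-- ===== SOURCE B (Python) =====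
-- def create_hash_for_positive(class_indices):
--     n = len(class_indices)
--     lo = [0] * n
--     for i in range(1, n):
--         lo[i] = lo[i - 1] if class_indices[i] == class_indices[i - 1] else i
--     hi = [0] * n
--     for i in range(n - 1, -1, -1):
--         hi[i] = hi[i + 1] if i + 1 < n and class_indices[i + 1] == class_indices[i] else i
--     return {i: list(range(i - 1, lo[i] - 1, -1)) + list(range(i + 1, hi[i] + 1))
--             for i in range(n)}
-- ===== Notes on version B (the rewrite author's own statement) =====
-- stated objective: alternative
-- what changed: Instead of re-scanning backward and forward from every index, B computes each index's run start (lo) and run end (hi) in two linear sweeps and emits each neighbor list directly as range(i-1, lo-1, -1) + range(i+1, hi+1).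
import Mathlib
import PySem

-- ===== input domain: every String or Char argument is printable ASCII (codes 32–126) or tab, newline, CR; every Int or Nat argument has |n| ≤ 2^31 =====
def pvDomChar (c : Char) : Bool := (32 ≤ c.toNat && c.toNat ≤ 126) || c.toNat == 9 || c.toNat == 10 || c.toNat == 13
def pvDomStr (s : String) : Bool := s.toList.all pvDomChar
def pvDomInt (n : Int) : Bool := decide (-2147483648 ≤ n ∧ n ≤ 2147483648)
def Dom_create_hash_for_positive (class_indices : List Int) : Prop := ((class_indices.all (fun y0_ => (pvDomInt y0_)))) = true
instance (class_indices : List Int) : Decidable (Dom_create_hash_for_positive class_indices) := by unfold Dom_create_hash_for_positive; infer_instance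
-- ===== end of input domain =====

-- B replaces A's per-index backward/forward re-scans by two linear sweeps computing each
-- index's run start (lo) and run end (hi), and fills each neighbor list from two ranges.

-- ===== PORT A =====
-- A's inner backward loop: for j in range(i): append i-j-1 while equal, else break.
-- (all indices touched are in range, so List.getD is exact for class_indices[...])
def pvBackLoop (a : List Int) (i j : Nat) : List Int :=
  if _h : j < i then
    if a.getD (i - j - 1) 0 = a.getD i 0 then
      ((i - j - 1 : Nat) : Int) :: pvBackLoop a i (j + 1)
    else []
  else []
termination_by i - j

-- A's inner forward loop: for j in range(len(a)-i-1): append i+1+j while equal, else break.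
def pvFwdLoop (a : List Int) (i j : Nat) : List Int :=
  if _h : j < a.length - i - 1 then
    if a.getD (i + 1 + j) 0 = a.getD i 0 then
      ((i + 1 + j : Nat) : Int) :: pvFwdLoop a i (j + 1)
    else []
  else []
termination_by a.length - i - 1 - j

-- the dict keyed 0..n-1 in insertion order; d[i] = backward hits then forward hits
def create_hash_for_positive (class_indices : List Int) : List (Int × List Int) :=
  (List.range class_indices.length).map
    (fun (i : Nat) => ((i : Int), pvBackLoop class_indices i 0 ++ pvFwdLoop class_indices i 0))

-- ===== PORT B =====
-- lo[i] : start of the maximal run of equal values containing i (forward sweep)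
def pvLo (a : List Int) : Nat → Nat
  | 0 => 0
  | i + 1 => if a.getD (i + 1) 0 = a.getD i 0 then pvLo a i else i + 1

-- hi[i] : end of the maximal run containing i (backward sweep)
def pvHi (a : List Int) (i : Nat) : Nat :=
  if _h : i + 1 < a.length then
    if a.getD (i + 1) 0 = a.getD i 0 then pvHi a (i + 1) else i
  else i
termination_by a.length - i

-- d[i] = list(range(i-1, lo[i]-1, -1)) + list(range(i+1, hi[i]+1))
def create_hash_for_positive_alt (class_indices : List Int) : List (Int × List Int) :=
  (List.range class_indices.length).map
    (fun (i : Nat) => ((i : Int),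
      PySem.List.pyRange ((i : Int) - 1) ((pvLo class_indices i : Int) - 1) (-1)
      ++ PySem.List.pyRange ((i : Int) + 1) ((pvHi class_indices i : Int) + 1) 1))

-- ===== PRECONDITION & SPEC =====
def Spec_create_hash_for_positive (class_indices : List Int) (out : List (Int × List Int)) : Prop := out = create_hash_for_positive_alt class_indices
instance (class_indices : List Int) (out : List (Int × List Int)) : Decidable (Spec_create_hash_for_positive class_indices out) := by unfold Spec_create_hash_for_positive; infer_instance

-- ===== CLAIM (what is proved, stated in full; the proofs are below) =====
def Claim_equal_create_hash_for_positive : Prop := ∀ (class_indices : List Int), Dom_create_hash_for_positive class_indices → Spec_create_hash_for_positive class_indices (create_hash_for_positive class_indices)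

-- ===== LEMMAS AND PROOFS =====

theorem pvLo_le (a : List Int) (i : Nat) : pvLo a i ≤ i := by
  induction i with
  | zero => simp [pvLo]
  | succ i ih => rw [pvLo]; split <;> omega

theorem pvHi_ge (a : List Int) (i : Nat) : i ≤ pvHi a i := by
  fun_induction pvHi a i with
  | case1 _ _ _ ih => omega
  | case2 => omega
  | case3 => omega

theorem back_shift (a : List Int) (i : Nat) (h : a.getD i 0 = a.getD (i + 1) 0) :
    ∀ f j, i - j ≤ f → pvBackLoop a (i + 1) (j + 1) = pvBackLoop a i j := by
  intro f
  induction f with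
  | zero =>
    intro j hj
    conv_lhs => rw [pvBackLoop]
    conv_rhs => rw [pvBackLoop]
    rw [dif_neg (by omega : ¬ j + 1 < i + 1), dif_neg (by omega : ¬ j < i)]
  | succ f ih =>
    intro j hj
    conv_lhs => rw [pvBackLoop]
    conv_rhs => rw [pvBackLoop]
    by_cases hji : j < i
    · rw [dif_pos (by omega : j + 1 < i + 1), dif_pos hji,
        (by omega : i + 1 - (j + 1) - 1 = i - j - 1), ← h]
      by_cases hv : a.getD (i - j - 1) 0 = a.getD i 0
      · rw [if_pos hv, if_pos hv, ih (j + 1) (by omega)]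
      · rw [if_neg hv, if_neg hv]
    · rw [dif_neg (by omega : ¬ j + 1 < i + 1), dif_neg hji]

theorem back_eq (a : List Int) (i : Nat) :
    pvBackLoop a i 0 = PySem.List.pyRange ((i : Int) - 1) ((pvLo a i : Int) - 1) (-1) := by
  induction i with
  | zero =>
    rw [pvBackLoop, dif_neg (by omega : ¬ 0 < 0), pvLo,
      PySem.List.pyRange_neg_one_eq_nil (by omega)]
  | succ i ih =>
    conv_lhs => rw [pvBackLoop]
    rw [dif_pos (by omega : 0 < i + 1), (by omega : i + 1 - 0 - 1 = i)]
    by_cases heq : a.getD i 0 = a.getD (i + 1) 0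
    · have hlo : pvLo a (i + 1) = pvLo a i := by rw [pvLo, if_pos heq.symm]
      have hle : pvLo a i ≤ i := pvLo_le a i
      rw [if_pos heq, back_shift a i heq i 0 (by omega), ih, hlo,
        (by push_cast; ring : (((i + 1 : Nat)) : Int) - 1 = (i : Int))]
      conv_rhs => rw [PySem.List.pyRange_neg_one_cons (by push_cast; omega :
        ((pvLo a i : Int) - 1) < (i : Int))]
    · have hlo : pvLo a (i + 1) = i + 1 := by
        rw [pvLo, if_neg (fun hx => heq hx.symm)]
      rw [if_neg heq, hlo, PySem.List.pyRange_neg_one_eq_nil (by push_cast; omega)]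

theorem fwd_shift (a : List Int) (i : Nat) (h : a.getD (i + 1) 0 = a.getD i 0) :
    ∀ f j, a.length - i - j ≤ f → pvFwdLoop a i (j + 1) = pvFwdLoop a (i + 1) j := by
  intro f
  induction f with
  | zero =>
    intro j hj
    conv_lhs => rw [pvFwdLoop]
    conv_rhs => rw [pvFwdLoop]
    rw [dif_neg (by omega : ¬ j + 1 < a.length - i - 1),
      dif_neg (by omega : ¬ j < a.length - (i + 1) - 1)]
  | succ f ih =>
    intro j hj
    conv_lhs => rw [pvFwdLoop]
    conv_rhs => rw [pvFwdLoop]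
    by_cases hji : j < a.length - (i + 1) - 1
    · rw [dif_pos (by omega : j + 1 < a.length - i - 1), dif_pos hji,
        (by omega : i + 1 + (j + 1) = i + 1 + 1 + j), h]
      by_cases hv : a.getD (i + 1 + 1 + j) 0 = a.getD i 0
      · rw [if_pos hv, if_pos hv, ih (j + 1) (by omega)]
      · rw [if_neg hv, if_neg hv]
    · rw [dif_neg (by omega : ¬ j + 1 < a.length - i - 1), dif_neg hji]

theorem fwd_eq (a : List Int) :
    ∀ f i, a.length - i ≤ f →
      pvFwdLoop a i 0 = PySem.List.pyRange ((i : Int) + 1) ((pvHi a i : Int) + 1) 1 := by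
  intro f
  induction f with
  | zero =>
    intro i hi
    rw [pvFwdLoop, pvHi, dif_neg (by omega : ¬ 0 < a.length - i - 1),
      dif_neg (by omega : ¬ i + 1 < a.length),
      PySem.List.pyRange_one_eq_nil (by omega)]
  | succ f ih =>
    intro i hi
    conv_lhs => rw [pvFwdLoop]
    conv_rhs => rw [pvHi]
    by_cases h1 : i + 1 < a.length
    · rw [dif_pos (by omega : 0 < a.length - i - 1), dif_pos h1,
        (by omega : i + 1 + 0 = i + 1)]
      by_cases heq : a.getD (i + 1) 0 = a.getD i 0
      · have hge : i + 1 ≤ pvHi a (i + 1) := pvHi_ge a (i + 1)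
        rw [if_pos heq, if_pos heq, fwd_shift a i heq (a.length - i) 0 (by omega),
          ih (i + 1) (by omega)]
        conv_rhs => rw [PySem.List.pyRange_one_cons (by push_cast; omega :
          (i : Int) + 1 < (pvHi a (i + 1) : Int) + 1)]
        push_cast
        ring_nf
      · rw [if_neg heq, if_neg heq, PySem.List.pyRange_one_eq_nil (by omega)]
    · rw [dif_neg (by omega : ¬ 0 < a.length - i - 1), dif_neg h1,
        PySem.List.pyRange_one_eq_nil (by omega)]

-- ===== VERDICT (by name: the statement is the Claim_ definition above) =====
theorem create_hash_for_positive_spec : Claim_equal_create_hash_for_positive := by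
  intro a _
  unfold Spec_create_hash_for_positive create_hash_for_positive create_hash_for_positive_alt
  refine List.map_congr_left (fun i _ => ?_)
  rw [back_eq, fwd_eq a a.length i (by omega)]
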